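-- pv_equiv track=rewrite | github.com/WiktoriaWezgraj/Python | 04-Functions/7-14.py | f
-- ===== SOURCE A (Python) =====
-- def f(detector):
--     enter_count = 0
--     leave_count = 0
--     for sign in detector:
--         if sign == '+':
--             enter_count +=1
--         elif sign == '-':
--             leave_count += 1
--         if enter_count-leave_count<3:
--             continue
--         else:
--             return True
--     return False
-- ===== SOURCE B (Python) =====
-- def f(detector):
--     # Divide and conquer: the answer is whether the maximum surplus (enters minus
--     # leaves) over the nonempty prefixes of detector reaches 3.  scan(seg) returns
--     # (total surplus of seg, max surplus over nonempty prefixes of seg).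
--     def scan(seg):
--         if len(seg) <= 1:
--             d = 1 if seg[0] == '+' else -1 if seg[0] == '-' else 0
--             return d, d
--         mid = len(seg) // 2
--         left = scan(seg[:mid])
--         right = scan(seg[mid:])
--         return left[0] + right[0], max(left[1], left[0] + right[1])
--
--     return bool(detector) and scan(detector)[1] >= 3
-- ===== Notes on version B (the rewrite author's own statement) =====
-- stated objective: alternative
-- what changed: Replaces the stateful two-counter streaming loop with early return by a divide-and-conquer computation of the maximum prefix surplus (recursing on halves and combining (total, maxprefix) pairs), then compares that maximum with 3.
import Mathlib
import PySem

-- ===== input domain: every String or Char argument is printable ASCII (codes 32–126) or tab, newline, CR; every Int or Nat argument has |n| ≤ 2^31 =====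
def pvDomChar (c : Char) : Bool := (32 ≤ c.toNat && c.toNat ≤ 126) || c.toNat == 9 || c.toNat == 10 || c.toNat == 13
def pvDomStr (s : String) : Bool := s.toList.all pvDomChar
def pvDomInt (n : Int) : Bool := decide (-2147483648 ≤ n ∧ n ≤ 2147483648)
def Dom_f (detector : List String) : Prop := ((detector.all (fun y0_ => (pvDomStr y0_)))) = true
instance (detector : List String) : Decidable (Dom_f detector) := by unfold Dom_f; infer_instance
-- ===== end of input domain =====

-- B trades A's stateful two-counter streaming loop for a divide-and-conquer computation of the
-- maximum prefix surplus (alternative decomposition; same O(n) cost).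

-- ===== PORT A =====
-- A's loop: two counters, after each element test enter-leave >= 3, early return True.
def fLoop : List String → Int → Int → Bool
  | [], _, _ => false
  | sign :: rest, enter_count, leave_count =>
    let enter_count' := if sign = "+" then enter_count + 1 else enter_count
    let leave_count' := if sign = "+" then leave_count else if sign = "-" then leave_count + 1 else leave_count
    if enter_count' - leave_count' < 3 then fLoop rest enter_count' leave_count' else true

def f (detector : List String) : Bool := fLoop detector 0 0

-- ===== PORT B =====
-- Source B's scan(seg): (total surplus of seg, max surplus over nonempty prefixes of seg),
-- combining the two halves' pairs.  In B, scan is only reached with seg nonempty; the []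
-- base returns (0, 0) purely to make the Lean recursion total (unreachable from f_alt).
def scanDC (seg : List String) : Int × Int :=
  if h : seg.length ≤ 1 then
    match seg with
    | [] => (0, 0)
    | s :: _ =>
      let d : Int := if s = "+" then 1 else if s = "-" then -1 else 0
      (d, d)
  else
    let mid := seg.length / 2
    let left := scanDC (seg.take mid)
    let right := scanDC (seg.drop mid)
    (left.1 + right.1, max left.2 (left.1 + right.2))
termination_by seg.length
decreasing_by
  · simp only [List.length_take]; omega
  · simp only [List.length_drop]; omega

def f_alt (detector : List String) : Bool :=
  decide (detector ≠ []) && decide (3 ≤ (scanDC detector).2)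

-- ===== PRECONDITION & SPEC =====
def Spec_f (detector : List String) (out : Bool) : Prop := out = f_alt detector
instance (detector : List String) (out : Bool) : Decidable (Spec_f detector out) := by unfold Spec_f; infer_instance

-- ===== CLAIM (what is proved, stated in full; the proofs are below) =====
def Claim_equal_f : Prop := ∀ (detector : List String), Dom_f detector → Spec_f detector (f detector)

-- ===== LEMMAS AND PROOFS =====
-- signed surplus of a list, and the per-element delta
def pvDelta (s : String) : Int := if s = "+" then 1 else if s = "-" then -1 else 0
def pvBal (ys : List String) : Int := (ys.count "+" : Int) - (ys.count "-" : Int)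

-- max surplus over the nonempty prefixes of a nonempty list ([] case is junk)
def pvM : List String → Int
  | [] => 0
  | [s] => pvDelta s
  | s :: t :: ts => max (pvDelta s) (pvDelta s + pvM (t :: ts))

lemma pvBal_nil : pvBal [] = 0 := by simp [pvBal]

lemma pvBal_cons (s : String) (ys : List String) : pvBal (s :: ys) = pvDelta s + pvBal ys := by
  simp only [pvBal, pvDelta, List.count_cons, beq_iff_eq]
  split_ifs <;> first | (push_cast; omega) | (exfalso; simp_all)

lemma pvBal_append (xs ys : List String) : pvBal (xs ++ ys) = pvBal xs + pvBal ys := by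
  simp [pvBal, List.count_append]; omega

lemma pvM_cons (s : String) (ys : List String) (h : ys ≠ []) :
    pvM (s :: ys) = max (pvDelta s) (pvDelta s + pvM ys) := by
  cases ys with
  | nil => exact absurd rfl h
  | cons t ts => rfl

lemma pvM_append (xs ys : List String) (hx : xs ≠ []) (hy : ys ≠ []) :
    pvM (xs ++ ys) = max (pvM xs) (pvBal xs + pvM ys) := by
  induction xs with
  | nil => exact absurd rfl hx
  | cons s rest ih =>
    cases hr : rest with
    | nil =>
      subst hr
      rw [List.cons_append, List.nil_append, pvM_cons s ys hy]
      simp [pvM, pvBal_cons, pvBal_nil]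
    | cons t ts =>
      rw [← hr]
      have hrne : rest ≠ [] := by simp [hr]
      have happ : rest ++ ys ≠ [] := by simp [hr]
      rw [List.cons_append, pvM_cons s (rest ++ ys) happ, ih hrne,
          pvM_cons s rest hrne, pvBal_cons]
      rcases le_total (pvM rest) (pvBal rest + pvM ys) with h | h <;>
        rcases le_total (pvDelta s) (pvDelta s + pvM rest) with h2 | h2 <;>
        · simp [max_def]; split_ifs <;> omega

lemma scanDC_spec_aux : ∀ (n : Nat) (seg : List String), seg.length = n → seg ≠ [] →
    scanDC seg = (pvBal seg, pvM seg) := by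
  intro n
  induction n using Nat.strong_induction_on with
  | _ n ih =>
    intro seg hlen hne
    rw [scanDC]
    by_cases h1 : seg.length ≤ 1
    · rw [dif_pos h1]
      cases seg with
      | nil => exact absurd rfl hne
      | cons s rest =>
        cases rest with
        | nil => simp [pvM, pvBal_cons, pvBal_nil, pvDelta]
        | cons t ts => simp at h1
    · rw [dif_neg h1]
      push Not at h1
      have hmid1 : 1 ≤ seg.length / 2 := by omega
      have hmidlt : seg.length / 2 < seg.length := by omega
      have htne : seg.take (seg.length / 2) ≠ [] := by
        apply List.ne_nil_of_length_pos; rw [List.length_take]; omega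
      have hdne : seg.drop (seg.length / 2) ≠ [] := by
        apply List.ne_nil_of_length_pos; rw [List.length_drop]; omega
      have hlt : (seg.take (seg.length / 2)).length < n := by
        simp [List.length_take]; omega
      have hld : (seg.drop (seg.length / 2)).length < n := by
        simp [List.length_drop]; omega
      show ((scanDC (seg.take (seg.length / 2))).1 + (scanDC (seg.drop (seg.length / 2))).1,
            max (scanDC (seg.take (seg.length / 2))).2
              ((scanDC (seg.take (seg.length / 2))).1 + (scanDC (seg.drop (seg.length / 2))).2))
          = (pvBal seg, pvM seg)
      rw [ih _ hlt _ rfl htne, ih _ hld _ rfl hdne]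
      have hsplit : seg.take (seg.length / 2) ++ seg.drop (seg.length / 2) = seg :=
        List.take_append_drop _ _
      have hbal : pvBal seg = pvBal (seg.take (seg.length / 2)) + pvBal (seg.drop (seg.length / 2)) := by
        conv_lhs => rw [← hsplit]
        rw [pvBal_append]
      have hM : pvM seg = max (pvM (seg.take (seg.length / 2)))
          (pvBal (seg.take (seg.length / 2)) + pvM (seg.drop (seg.length / 2))) := by
        conv_lhs => rw [← hsplit]
        exact pvM_append _ _ htne hdne
      simp only [hbal, hM]

lemma scanDC_spec (seg : List String) (h : seg ≠ []) :
    scanDC seg = (pvBal seg, pvM seg) :=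
  scanDC_spec_aux seg.length seg rfl h

-- A's loop as "some prefix has surplus ≥ 3"
lemma fLoop_any (xs : List String) : ∀ (e l : Int),
    fLoop xs e l = (List.range xs.length).any (fun k => decide (3 ≤ e - l + pvBal (xs.take (k + 1)))) := by
  induction xs with
  | nil => intro e l; simp [fLoop]
  | cons s rest ih =>
    intro e l
    have hrange : List.range (s :: rest).length = 0 :: (List.range rest.length).map (· + 1) := by
      simp [List.length_cons, List.range_succ_eq_map]
    rw [hrange, List.any_cons, List.any_map]
    have hP0 : pvBal ((s :: rest).take (0 + 1)) = pvDelta s := by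
      show pvBal [s] = pvDelta s
      rw [show [s] = s :: ([] : List String) from rfl, pvBal_cons, pvBal_nil]; ring
    have hfun : (fun k => decide (3 ≤ e - l + pvBal ((s :: rest).take (k + 1 + 1)))) =
        (fun k : Nat => decide (3 ≤ (e - l + pvDelta s) + pvBal (rest.take (k + 1)))) := by
      funext k; rw [List.take_succ_cons, pvBal_cons, ← add_assoc]
    simp only [Function.comp_def]
    rw [hP0, hfun]
    show (if (if s = "+" then e + 1 else e) -
            (if s = "+" then l else if s = "-" then l + 1 else l) < 3
          then fLoop rest (if s = "+" then e + 1 else e)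
            (if s = "+" then l else if s = "-" then l + 1 else l)
          else true) = _
    have hnew : (if s = "+" then e + 1 else e) -
        (if s = "+" then l else if s = "-" then l + 1 else l) = e - l + pvDelta s := by
      unfold pvDelta; split_ifs <;> omega
    rw [hnew]
    by_cases hc : e - l + pvDelta s < 3
    · rw [if_pos hc, ih, hnew]
      have : decide (3 ≤ e - l + pvDelta s) = false := by simp; omega
      rw [this, Bool.false_or]
    · rw [if_neg hc]
      have : decide (3 ≤ e - l + pvDelta s) = true := by simp; omega
      rw [this, Bool.true_or]

-- pvM is the maximum prefix surplus: a bound c is reached by some prefix iff c ≤ pvM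
lemma pvM_iff (xs : List String) : ∀ (c : Int), xs ≠ [] →
    ((∃ k < xs.length, c ≤ pvBal (xs.take (k + 1))) ↔ c ≤ pvM xs) := by
  induction xs with
  | nil => intro c h; exact absurd rfl h
  | cons s rest ih =>
    intro c _
    cases hr : rest with
    | nil =>
      subst hr
      constructor
      · rintro ⟨k, hk, hc⟩
        simp only [List.length_cons, List.length_nil] at hk
        have hk0 : k = 0 := by omega
        subst hk0
        simpa [pvM, pvBal_cons, pvBal_nil] using hc
      · intro hc
        exact ⟨0, by simp, by simpa [pvM, pvBal_cons, pvBal_nil] using hc⟩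
    | cons t ts =>
      rw [← hr]
      have hrne : rest ≠ [] := by simp [hr]
      rw [pvM_cons s rest hrne, le_max_iff]
      constructor
      · rintro ⟨k, hk, hc⟩
        cases k with
        | zero =>
          left; simpa [pvBal_cons, pvBal_nil] using hc
        | succ k' =>
          right
          rw [List.take_succ_cons, pvBal_cons] at hc
          have : c - pvDelta s ≤ pvM rest := by
            rw [← ih (c - pvDelta s) hrne]
            exact ⟨k', by simpa using hk, by omega⟩
          omega
      · rintro (hc | hc)
        · exact ⟨0, by simp, by simpa [pvBal_cons, pvBal_nil] using hc⟩
        · have := (ih (c - pvDelta s) hrne).2 (by omega)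
          obtain ⟨k, hk, hck⟩ := this
          exact ⟨k + 1, by simpa using hk,
            by rw [List.take_succ_cons, pvBal_cons]; omega⟩

-- ===== VERDICT (by name: the statement is the Claim_ definition above) =====
theorem f_spec : Claim_equal_f := by
  intro detector _
  unfold Spec_f f f_alt
  cases hd : detector with
  | nil => simp [fLoop]
  | cons s rest =>
    rw [← hd]
    have hne : detector ≠ [] := by simp [hd]
    rw [fLoop_any, scanDC_spec detector hne]
    simp only [hne, decide_true, ne_eq, not_false_eq_true, Bool.true_and]
    rcases hM : decide (3 ≤ pvM detector) with _ | _
    · rw [decide_eq_false_iff_not] at hM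
      apply List.any_eq_false.2
      intro k hk
      rw [List.mem_range] at hk
      simp only [decide_eq_true_eq]
      intro hc
      exact hM ((pvM_iff detector 3 hne).1 ⟨k, hk, by omega⟩)
    · rw [decide_eq_true_eq] at hM
      obtain ⟨k, hk, hck⟩ := (pvM_iff detector 3 hne).2 hM
      apply List.any_eq_true.2
      refine ⟨k, List.mem_range.2 hk, ?_⟩
      simp only [decide_eq_true_eq]
      omega
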